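-- pv_equiv track=rewrite | github.com/faiyaz72/codingPractice | Graphs/dfs.py | sum_to_n
-- ===== SOURCE A (Python) =====
-- def sum_to_n(integers, N):
--     def dfs(total, path, res):
--         if total == N:
--             res.append(path[:])
--             return
--         for num in integers:
--             if len(path) > 0 and path[-1] > num:
--                 continue
--             if total + num <= N:
--                 path.append(num)
--                 dfs(total + num, path, res)
--                 path.pop()
--
--     res = []
--     dfs(0, [], res)
--     return res
-- ===== SOURCE B (Python) =====
-- def sum_to_n(integers, N):
--     res = []
--     stack = [(0, [])]
--     while stack:
--         total, path = stack.pop()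
--         if total == N:
--             res.append(path)
--             continue
--         for num in reversed(integers):
--             if path and path[-1] > num:
--                 continue
--             if total + num <= N:
--                 stack.append((total + num, path + [num]))
--     return res
-- ===== Notes on version B (the rewrite author's own statement) =====
-- stated objective: alternative
-- what changed: Replaces the recursive DFS with mutated path/res accumulators by an iterative explicit-stack loop over immutable (total, path) states, pushing candidates in reverse so pops preserve A's pre-order output; Pre_ excludes only the inputs (some num <= 0 with num <= N) on which A recurses forever and raises RecursionError (B's loop does not terminate there either).
import Mathlib
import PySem

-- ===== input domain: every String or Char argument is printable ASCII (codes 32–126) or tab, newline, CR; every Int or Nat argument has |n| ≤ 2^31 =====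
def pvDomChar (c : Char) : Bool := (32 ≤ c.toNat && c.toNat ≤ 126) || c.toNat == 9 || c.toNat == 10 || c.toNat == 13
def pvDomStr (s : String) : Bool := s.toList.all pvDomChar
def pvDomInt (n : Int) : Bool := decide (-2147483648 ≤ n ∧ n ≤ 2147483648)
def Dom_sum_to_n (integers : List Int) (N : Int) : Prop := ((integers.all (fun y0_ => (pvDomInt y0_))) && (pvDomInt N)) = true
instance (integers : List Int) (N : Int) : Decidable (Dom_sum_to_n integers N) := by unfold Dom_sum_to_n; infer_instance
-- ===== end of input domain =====

-- B replaces A's recursive DFS (mutating path/res) by an explicit-stack loop over immutable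
-- (total, path) states, pushing candidates reversed so pops reproduce A's output order exactly.

-- ===== PORT A =====
-- A's recursion has no structural bound, so the port carries a fuel argument; inside Pre_
-- every pickable num is ≥ 1 except a num = N picked first (its call returns at once), so the
-- call depth is at most N.toNat + 2 and the fuel is never exhausted.
-- path[-1] under the guard len(path) > 0 is ported as path.getLastD 0 (exact: path nonempty).
def pvDfsA (integers : List Int) (N : Int) : Nat → Int → List Int → List (List Int) → List (List Int)
  | 0, _, _, res => res
  | fuel+1, total, path, res =>
    if total = N then res ++ [path]
    else integers.foldl (fun acc num =>
      if path.length > 0 ∧ path.getLastD 0 > num then acc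
      else if total + num ≤ N then pvDfsA integers N fuel (total + num) (path ++ [num]) acc
      else acc) res

def sum_to_n (integers : List Int) (N : Int) : List (List Int) :=
  pvDfsA integers N (N.toNat + 2) 0 [] []

-- ===== PORT B =====
-- Python stack (append/pop at the right end) is modelled head-as-top: pop = head,
-- append = cons; the `for num in reversed(integers)` loop is a foldl over integers.reverse.
-- The while-loop carries fuel; inside Pre_ the loop does at most (length+1)^(N.toNat+2)
-- iterations, so that fuel is never exhausted.
def pvPush (N total : Int) (path : List Int) (stack : List (Int × List Int)) (num : Int) :
    List (Int × List Int) :=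
  if path.length > 0 ∧ path.getLastD 0 > num then stack
  else if total + num ≤ N then (total + num, path ++ [num]) :: stack
  else stack

def pvLoopB (integers : List Int) (N : Int) : Nat → List (Int × List Int) → List (List Int) → List (List Int)
  | 0, _, res => res
  | _+1, [], res => res
  | fuel+1, (total, path) :: stack, res =>
    if total = N then pvLoopB integers N fuel stack (res ++ [path])
    else pvLoopB integers N fuel (integers.reverse.foldl (pvPush N total path) stack) res

def sum_to_n_alt (integers : List Int) (N : Int) : List (List Int) :=
  pvLoopB integers N ((integers.length + 1) ^ (N.toNat + 2)) [(0, [])] []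

-- ===== PRECONDITION & SPEC =====
-- Pre_ excludes exactly the inputs on which Python A never returns (RecursionError):
-- unless N = 0 (immediate return), any num ≤ 0 with num ≤ N and num ≠ N is re-picked forever.
def Pre_sum_to_n (integers : List Int) (N : Int) : Prop :=
  N = 0 ∨ ∀ x ∈ integers, x ≤ 0 → (N < x ∨ x = N)
instance (integers : List Int) (N : Int) : Decidable (Pre_sum_to_n integers N) := by
  unfold Pre_sum_to_n; infer_instance

def pvWitness_sum_to_n : List Int × Int := ([1, 2], 3)

def Spec_sum_to_n (integers : List Int) (N : Int) (out : List (List Int)) : Prop := out = sum_to_n_alt integers N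
instance (integers : List Int) (N : Int) (out : List (List Int)) : Decidable (Spec_sum_to_n integers N out) := by unfold Spec_sum_to_n; infer_instance

-- ===== CLAIM (what is proved, stated in full; the proofs are below) =====
def Claim_equal_sum_to_n : Prop := ∀ (integers : List Int) (N : Int), Dom_sum_to_n integers N → Pre_sum_to_n integers N → Spec_sum_to_n integers N (sum_to_n integers N)

-- ===== LEMMAS AND PROOFS =====

-- The candidate children of a state, in integers order (head popped first by B).
def pvMk (N total : Int) (path : List Int) (num : Int) : Option (Int × List Int) :=
  if path.length > 0 ∧ path.getLastD 0 > num then none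
  else if total + num ≤ N then some (total + num, path ++ [num])
  else none

def pvChildren (integers : List Int) (N total : Int) (path : List Int) : List (Int × List Int) :=
  integers.filterMap (pvMk N total path)

-- Number of loop iterations B spends on the subtree rooted at (total, path).
def pvCnt (integers : List Int) (N : Int) : Nat → Int → List Int → Nat
  | 0, _, _ => 1
  | F+1, total, path =>
    if total = N then 1
    else 1 + ((pvChildren integers N total path).map (fun c => pvCnt integers N F c.1 c.2)).sum

lemma pvStep_none (integers : List Int) (N : Int) (F : Nat) (total : Int) (path : List Int)
    (num : Int) (acc : List (List Int)) (h : pvMk N total path num = none) :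
    (if path.length > 0 ∧ path.getLastD 0 > num then acc
     else if total + num ≤ N then pvDfsA integers N F (total + num) (path ++ [num]) acc
     else acc) = acc := by
  unfold pvMk at h
  by_cases h1 : path.length > 0 ∧ path.getLastD 0 > num
  · rw [if_pos h1]
  · by_cases h2 : total + num ≤ N
    · rw [if_neg h1, if_pos h2] at h; cases h
    · rw [if_neg h1, if_neg h2]

lemma pvStep_some (integers : List Int) (N : Int) (F : Nat) (total : Int) (path : List Int)
    (num : Int) (acc : List (List Int)) (c : Int × List Int) (h : pvMk N total path num = some c) :
    (if path.length > 0 ∧ path.getLastD 0 > num then acc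
     else if total + num ≤ N then pvDfsA integers N F (total + num) (path ++ [num]) acc
     else acc) = pvDfsA integers N F c.1 c.2 acc := by
  unfold pvMk at h
  by_cases h1 : path.length > 0 ∧ path.getLastD 0 > num
  · rw [if_pos h1] at h; cases h
  · by_cases h2 : total + num ≤ N
    · rw [if_neg h1, if_pos h2] at h
      obtain rfl := Option.some.inj h
      rw [if_neg h1, if_pos h2]
    · rw [if_neg h1, if_neg h2] at h; cases h

lemma pvPush_eq (N total : Int) (path : List Int) (stack : List (Int × List Int)) (num : Int) :
    pvPush N total path stack num = ((pvMk N total path num).toList) ++ stack := by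
  unfold pvPush pvMk
  split_ifs <;> simp

lemma pvDfsA_append (integers : List Int) (N : Int) :
    ∀ fuel total path res, pvDfsA integers N fuel total path res
      = res ++ pvDfsA integers N fuel total path [] := by
  intro fuel
  induction fuel with
  | zero => intro total path res; simp [pvDfsA]
  | succ F ih =>
    intro total path res
    by_cases ht : total = N
    · simp [pvDfsA, ht]
    · simp only [pvDfsA, if_neg ht]
      suffices h : ∀ (l : List Int) (r : List (List Int)),
          l.foldl (fun acc num =>
            if path.length > 0 ∧ path.getLastD 0 > num then acc
            else if total + num ≤ N then pvDfsA integers N F (total + num) (path ++ [num]) acc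
            else acc) r
          = r ++ l.foldl (fun acc num =>
            if path.length > 0 ∧ path.getLastD 0 > num then acc
            else if total + num ≤ N then pvDfsA integers N F (total + num) (path ++ [num]) acc
            else acc) [] by
        exact h integers res
      intro l
      induction l with
      | nil => intro r; simp
      | cons a l ihl =>
        intro r
        rw [List.foldl_cons, List.foldl_cons]
        rw [ihl]
        conv_rhs => rw [ihl]
        cases h : pvMk N total path a with
        | none =>
          rw [pvStep_none integers N F total path a r h,
            pvStep_none integers N F total path a [] h]
          simp
        | some c =>
          rw [pvStep_some integers N F total path a r c h,
            pvStep_some integers N F total path a [] c h,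
            ih c.1 c.2 r, List.append_assoc]

lemma pvDfsA_succ_ne (integers : List Int) (N : Int) (F : Nat) (total : Int) (path : List Int)
    (ht : total ≠ N) :
    pvDfsA integers N (F+1) total path []
      = (pvChildren integers N total path).flatMap (fun c => pvDfsA integers N F c.1 c.2 []) := by
  simp only [pvDfsA, if_neg ht]
  suffices h : ∀ (l : List Int) (r : List (List Int)),
      l.foldl (fun acc num =>
        if path.length > 0 ∧ path.getLastD 0 > num then acc
        else if total + num ≤ N then pvDfsA integers N F (total + num) (path ++ [num]) acc
        else acc) r
      = r ++ (l.filterMap (pvMk N total path)).flatMap (fun c => pvDfsA integers N F c.1 c.2 []) by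
    simpa [pvChildren] using h integers []
  intro l
  induction l with
  | nil => intro r; simp
  | cons a l ihl =>
    intro r
    rw [List.foldl_cons, List.filterMap_cons]
    cases h : pvMk N total path a with
    | none =>
      rw [pvStep_none integers N F total path a r h]
      exact ihl r
    | some c =>
      rw [pvStep_some integers N F total path a r c h, ihl,
        pvDfsA_append integers N F c.1 c.2 r]
      simp [List.append_assoc]

lemma pvFoldl_push (N total : Int) (path : List Int) :
    ∀ (l : List Int) (stack : List (Int × List Int)),
      l.reverse.foldl (pvPush N total path) stack = (l.filterMap (pvMk N total path)) ++ stack := by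
  intro l
  induction l with
  | nil => intro stack; simp
  | cons a l ihl =>
    intro stack
    simp only [List.reverse_cons, List.foldl_append, List.foldl_cons, List.foldl_nil]
    rw [ihl, pvPush_eq]
    cases h : pvMk N total path a <;> simp [h]

lemma pvCnt_le (integers : List Int) (N : Int) :
    ∀ F total path, pvCnt integers N F total path ≤ (integers.length + 1) ^ F := by
  intro F
  induction F with
  | zero => intro total path; simp [pvCnt]
  | succ F ih =>
    intro total path
    by_cases ht : total = N
    · simp only [pvCnt, if_pos ht]
      exact Nat.one_le_pow _ _ (Nat.succ_pos _)
    · simp only [pvCnt, if_neg ht]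
      have hlen : (pvChildren integers N total path).length ≤ integers.length :=
        List.length_filterMap_le _ _
      have hsum : ((pvChildren integers N total path).map
          (fun c => pvCnt integers N F c.1 c.2)).sum
          ≤ (pvChildren integers N total path).length * (integers.length + 1) ^ F := by
        have := List.sum_le_card_nsmul
          ((pvChildren integers N total path).map (fun c => pvCnt integers N F c.1 c.2))
          ((integers.length + 1) ^ F) (by
            intro x hx
            rcases List.mem_map.mp hx with ⟨c, _, rfl⟩
            exact ih c.1 c.2)
        simpa [smul_eq_mul] using this
      have hpow : 1 ≤ (integers.length + 1) ^ F := Nat.one_le_pow _ _ (Nat.succ_pos _)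
      calc 1 + ((pvChildren integers N total path).map (fun c => pvCnt integers N F c.1 c.2)).sum
          ≤ 1 + integers.length * (integers.length + 1) ^ F := by
            have := le_trans hsum (Nat.mul_le_mul_right _ hlen)
            omega
        _ ≤ (integers.length + 1) ^ F + integers.length * (integers.length + 1) ^ F := by omega
        _ = (integers.length + 1) ^ (F + 1) := by ring

lemma pvChildren_mem (integers : List Int) (N total : Int) (path : List Int)
    (hpre : ∀ x ∈ integers, x ≤ 0 → (N < x ∨ x = N)) (htot : 0 ≤ total)
    {c : Int × List Int} (hc : c ∈ pvChildren integers N total path) :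
    (0 ≤ c.1 ∧ total < c.1 ∧ c.1 ≤ N) ∨ c.1 = N := by
  rcases List.mem_filterMap.mp hc with ⟨num, hnum, hmk⟩
  unfold pvMk at hmk
  by_cases h1 : path.length > 0 ∧ path.getLastD 0 > num
  · rw [if_pos h1] at hmk; cases hmk
  · by_cases h2 : total + num ≤ N
    · rw [if_neg h1, if_pos h2] at hmk
      obtain rfl := Option.some.inj hmk
      by_cases hnum1 : 1 ≤ num
      · left; refine ⟨?_, ?_, ?_⟩ <;> simp <;> omega
      · rcases hpre num hnum (by omega) with hN | hxN
        · exfalso; omega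
        · right; simp; omega
    · rw [if_neg h1, if_neg h2] at hmk; cases hmk

lemma pvLoopB_nil (integers : List Int) (N : Int) (k : Nat) (res : List (List Int)) :
    pvLoopB integers N k [] res = res := by
  cases k <;> rfl

lemma pvMain (integers : List Int) (N : Int)
    (hpre : ∀ x ∈ integers, x ≤ 0 → (N < x ∨ x = N)) :
    ∀ F total path stack res k, (0 ≤ total ∨ total = N) →
      ((N - total).toNat + 2 ≤ F ∨ (total = N ∧ 1 ≤ F)) →
      pvLoopB integers N (pvCnt integers N F total path + k) ((total, path) :: stack) res
        = pvLoopB integers N k stack (res ++ pvDfsA integers N F total path []) := by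
  intro F
  induction F with
  | zero => intro total path stack res k _ h; omega
  | succ F ih =>
    intro total path stack res k htot hfuel
    by_cases ht : total = N
    · have h1 : pvCnt integers N (F+1) total path + k = k + 1 := by
        simp [pvCnt, ht]; omega
      rw [h1]
      simp [pvLoopB, ht, pvDfsA]
    · have htot0 : 0 ≤ total := htot.resolve_right ht
      have hF : (N - total).toNat + 1 ≤ F := by
        rcases hfuel with h | h
        · omega
        · exact absurd h.1 ht
      have h1 : pvCnt integers N (F+1) total path + k
          = (((pvChildren integers N total path).map
              (fun c => pvCnt integers N F c.1 c.2)).sum + k) + 1 := by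
        simp [pvCnt, ht]; omega
      rw [h1]
      simp only [pvLoopB, if_neg ht]
      rw [pvFoldl_push]
      have hinner : ∀ (cs : List (Int × List Int)),
          (∀ c ∈ cs, (0 ≤ c.1 ∨ c.1 = N) ∧ ((N - c.1).toNat + 2 ≤ F ∨ (c.1 = N ∧ 1 ≤ F))) →
          ∀ (stack : List (Int × List Int)) (res : List (List Int)) (k : Nat),
            pvLoopB integers N ((cs.map (fun c => pvCnt integers N F c.1 c.2)).sum + k)
              (cs ++ stack) res
            = pvLoopB integers N k stack
                (res ++ cs.flatMap (fun c => pvDfsA integers N F c.1 c.2 [])) := by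
        intro cs
        induction cs with
        | nil => intro _ stack res k; simp
        | cons c cs ihc =>
          intro hcs stack res k
          have hc := hcs c (List.mem_cons_self)
          have h2 : ((c :: cs).map (fun c => pvCnt integers N F c.1 c.2)).sum + k
              = pvCnt integers N F c.1 c.2
                + ((cs.map (fun c => pvCnt integers N F c.1 c.2)).sum + k) := by
            simp; omega
          rw [h2]
          obtain ⟨ct, cp⟩ := c
          rw [List.cons_append]
          rw [ih ct cp (cs ++ stack) res ((cs.map (fun c => pvCnt integers N F c.1 c.2)).sum + k)
            hc.1 hc.2]
          rw [ihc (fun c hcmem => hcs c (List.mem_cons_of_mem _ hcmem)) stack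
            (res ++ pvDfsA integers N F ct cp []) k]
          simp [List.append_assoc]
      rw [pvDfsA_succ_ne integers N F total path ht]
      exact hinner (pvChildren integers N total path)
        (fun c hc => by
          rcases pvChildren_mem integers N total path hpre htot0 hc with ⟨h0, hlt, hle⟩ | hcN
          · exact ⟨Or.inl h0, Or.inl (by omega)⟩
          · exact ⟨Or.inr hcN, Or.inr ⟨hcN, by omega⟩⟩) stack res k

-- ===== VERDICT (by name: the statement is the Claim_ definition above) =====
theorem sum_to_n_spec : Claim_equal_sum_to_n := by
  intro integers N _ hpre
  unfold Spec_sum_to_n sum_to_n sum_to_n_alt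
  rcases hpre with hN0 | hpre
  · subst hN0
    obtain ⟨m, hm⟩ : ∃ m, (integers.length + 1) ^ ((0 : Int).toNat + 2) = m + 1 :=
      ⟨(integers.length + 1) ^ ((0 : Int).toNat + 2) - 1, by
        have := Nat.one_le_pow ((0 : Int).toNat + 2) (integers.length + 1) (Nat.succ_pos _)
        omega⟩
    rw [hm]
    simp [pvDfsA, pvLoopB, pvLoopB_nil]
  · have hle : pvCnt integers N (N.toNat + 2) 0 []
        ≤ (integers.length + 1) ^ (N.toNat + 2) := pvCnt_le integers N _ 0 []
    have hk : (integers.length + 1) ^ (N.toNat + 2)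
        = pvCnt integers N (N.toNat + 2) 0 []
          + ((integers.length + 1) ^ (N.toNat + 2) - pvCnt integers N (N.toNat + 2) 0 []) := by
      omega
    rw [hk, pvMain integers N hpre (N.toNat + 2) 0 [] [] [] _ (Or.inl le_rfl) (by omega),
      pvLoopB_nil]
    simp
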